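-- pv_equiv track=rewrite | github.com/hust220/cobio | tests/compare.py | seq_ind
-- ===== SOURCE A (Python) =====
-- def seq_ind(seq):
--   j = 0
--   ind = []
--   for c in seq:
--     if c != '-':
--       ind.append(j)
--       j += 1
--     else:
--       ind.append(-1)
--   return ind
-- ===== SOURCE B (Python) =====
-- def seq_ind(seq):
--     n = len(seq)
--     pre = [0] * (n + 1)
--     for i in range(n):
--         pre[i + 1] = pre[i] + (seq[i] != '-')
--     return [pre[i + 1] - 1 if seq[i] != '-' else -1 for i in range(n)]
-- ===== Notes on version B (the rewrite author's own statement) =====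
-- stated objective: alternative
-- what changed: Replaced the single stateful counter loop by two passes: first a precomputed prefix-count table of non-gap characters, then a lookup pass emitting pre[i+1]-1 for non-gaps and -1 for gaps.
import Mathlib
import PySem

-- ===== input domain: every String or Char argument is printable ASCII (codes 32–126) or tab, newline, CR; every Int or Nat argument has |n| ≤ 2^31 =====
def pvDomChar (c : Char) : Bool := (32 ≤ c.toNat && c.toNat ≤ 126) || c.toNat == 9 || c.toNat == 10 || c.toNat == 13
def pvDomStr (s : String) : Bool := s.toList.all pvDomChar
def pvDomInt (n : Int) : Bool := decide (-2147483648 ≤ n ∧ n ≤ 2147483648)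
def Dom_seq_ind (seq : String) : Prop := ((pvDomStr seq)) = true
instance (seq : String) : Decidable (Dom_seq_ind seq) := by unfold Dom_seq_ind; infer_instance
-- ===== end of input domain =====

-- Header: B builds a prefix-count table of non-gap characters and reads indices off it in a
-- second pass, instead of A's single stateful counter loop; objective: alternative decomposition.


-- ===== PORT A =====
-- A: one loop over seq with counter j and accumulator ind, appending j (and bumping it)
-- for non-gaps, -1 for gaps; seq_ind_loop is that loop's state recursion.
def seq_ind_loop : List Char → Int → List Int → List Int
  | [], _, ind => ind
  | c :: cs, j, ind =>
      if c ≠ '-' then seq_ind_loop cs (j + 1) (ind ++ [j])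
      else seq_ind_loop cs j (ind ++ [-1])

def seq_ind (seq : String) : List Int := seq_ind_loop seq.toList 0 []

-- ===== PORT B =====
-- B's prefix table pre[1..n] (cumulative non-gap counts), built left to right from acc
-- (transliterates Source B's `for i in range(n): pre[i+1] = pre[i] + (seq[i] != '-')`).
def seq_ind_pre : List Char → Int → List Int
  | [], _ => []
  | c :: cs, acc =>
      let acc' := acc + (if c ≠ '-' then 1 else 0)
      acc' :: seq_ind_pre cs acc'

-- B's second pass: the comprehension pairing each character with pre[i+1].
def seq_ind_alt (seq : String) : List Int :=
  (seq.toList.zip (seq_ind_pre seq.toList 0)).map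
    (fun cp => if cp.1 ≠ '-' then cp.2 - 1 else -1)

-- ===== PRECONDITION & SPEC =====
def Spec_seq_ind (seq : String) (out : List Int) : Prop := out = seq_ind_alt seq
instance (seq : String) (out : List Int) : Decidable (Spec_seq_ind seq out) := by unfold Spec_seq_ind; infer_instance

-- ===== CLAIM (what is proved, stated in full; the proofs are below) =====
def Claim_equal_seq_ind : Prop := ∀ (seq : String), Dom_seq_ind seq → Spec_seq_ind seq (seq_ind seq)

-- ===== LEMMAS AND PROOFS =====

theorem seq_ind_loop_eq (l : List Char) (j : Int) (ind : List Int) :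
    seq_ind_loop l j ind
    = ind ++ (l.zip (seq_ind_pre l j)).map (fun cp => if cp.1 ≠ '-' then cp.2 - 1 else -1) := by
  induction l generalizing j ind with
  | nil => simp [seq_ind_loop]
  | cons c cs ih =>
    by_cases h : c = '-'
    · simp [seq_ind_loop, seq_ind_pre, h, ih]
    · simp [seq_ind_loop, seq_ind_pre, h, ih]

-- ===== VERDICT (by name: the statement is the Claim_ definition above) =====
theorem seq_ind_spec : Claim_equal_seq_ind := by
  intro seq _
  unfold Spec_seq_ind seq_ind seq_ind_alt
  exact seq_ind_loop_eq _ 0 []
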